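-- pv_equiv track=rewrite | github.com/Sigiitttt/praktikumStrukturData | Praktikum1.1.py | temukan_indeks_maksimal
-- ===== SOURCE A (Python) =====
-- def temukan_indeks_maksimal(angka):
--     hasil_kali_terbesar = 0
--     pasangan_indeks_terbesar = [0, 0]
--
--     for i in range(len(angka)):
--         for j in range(i + 1, len(angka)):
--             hasil_kali = (angka[i] - 1) * (angka[j] - 1)
--             if hasil_kali > hasil_kali_terbesar:
--                 hasil_kali_terbesar = hasil_kali
--                 pasangan_indeks_terbesar = [i, j]
--     return pasangan_indeks_terbesar
-- ===== SOURCE B (Python) =====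
-- def temukan_indeks_maksimal(angka):
--     n = len(angka)
--     if n < 2:
--         return [0, 0]
--     mx = mn = angka[n - 1] - 1
--     mxi = mni = n - 1
--     best = None
--     pair = [0, 0]
--     for k in range(n - 2, -1, -1):
--         h = angka[k] - 1
--         if h > 0:
--             cand, j = h * mx, mxi
--         elif h < 0:
--             cand, j = h * mn, mni
--         else:
--             cand, j = 0, k + 1
--         if best is None or cand >= best:
--             best, pair = cand, [k, j]
--         if h >= mx:
--             mx, mxi = h, k
--         if h <= mn:
--             mn, mni = h, k
--     return pair if best > 0 else [0, 0]
-- ===== Notes on version B (the rewrite author's own statement) =====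
-- stated objective: faster
-- what changed: A compares (a[i]-1)*(a[j]-1) over all O(n^2) index pairs; B makes one right-to-left pass keeping the suffix maximum and minimum of a[k]-1 (with their first indices) so the best partner for each k is found in O(1), reproducing A's exact lexicographic tie-breaking.
import Mathlib
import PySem

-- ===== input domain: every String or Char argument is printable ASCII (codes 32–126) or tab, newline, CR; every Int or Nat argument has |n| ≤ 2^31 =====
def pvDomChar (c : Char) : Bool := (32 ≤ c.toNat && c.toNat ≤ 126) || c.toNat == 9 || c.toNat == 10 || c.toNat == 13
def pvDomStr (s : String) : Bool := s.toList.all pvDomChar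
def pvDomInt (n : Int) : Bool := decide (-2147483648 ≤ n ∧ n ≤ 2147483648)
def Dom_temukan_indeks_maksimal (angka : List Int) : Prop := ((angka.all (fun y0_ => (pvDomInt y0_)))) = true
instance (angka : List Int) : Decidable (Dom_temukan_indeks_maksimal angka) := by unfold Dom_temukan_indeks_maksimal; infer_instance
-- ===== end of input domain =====

-- B replaces A's O(n^2) scan over all index pairs by a single right-to-left O(n) pass that
-- tracks the suffix max/min of (x-1) with their first indices and the best pair so far (objective: faster).
-- ===== PORT A =====
def temukan_indeks_maksimal (angka : List Int) : List Int :=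
  let st0 : Int × List Int := (0, [0, 0])
  let fin := (PySem.List.pyRange 0 (angka.length : Int) 1).foldl (fun st i =>
    (PySem.List.pyRange (i + 1) (angka.length : Int) 1).foldl (fun st j =>
      let hasil_kali := (PySem.List.pyGetD angka i 0 - 1) * (PySem.List.pyGetD angka j 0 - 1)
      if hasil_kali > st.1 then (hasil_kali, [i, j]) else st) st) st0
  fin.2

-- ===== PORT B =====
def temukan_indeks_maksimal_alt (angka : List Int) : List Int :=
  let n : Int := angka.length
  if n < 2 then [0, 0] else
    let last := PySem.List.pyGetD angka (n - 1) 0 - 1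
    let fin := (PySem.List.pyRange (n - 2) (-1) (-1)).foldl (fun st k =>
        let h := PySem.List.pyGetD angka k 0 - 1
        let cj : Int × Int :=
          if h > 0 then (h * st.1, st.2.1)
          else if h < 0 then (h * st.2.2.1, st.2.2.2.1)
          else (0, k + 1)
        let bp : Int × List Int :=
          match st.2.2.2.2.1 with
          | none => (cj.1, [k, cj.2])
          | some b => if cj.1 ≥ b then (cj.1, [k, cj.2]) else (b, st.2.2.2.2.2)
        let mx : Int × Int := if h ≥ st.1 then (h, k) else (st.1, st.2.1)
        let mn : Int × Int := if h ≤ st.2.2.1 then (h, k) else (st.2.2.1, st.2.2.2.1)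
        (mx.1, mx.2, mn.1, mn.2, some bp.1, bp.2))
      ((last, n - 1, last, n - 1, none, [0, 0]) :
        Int × Int × Int × Int × Option Int × List Int)
    match fin.2.2.2.2.1 with
    | some b => if b > 0 then fin.2.2.2.2.2 else [0, 0]
    | none => [0, 0]

-- ===== PRECONDITION & SPEC =====
def Spec_temukan_indeks_maksimal (angka : List Int) (out : List Int) : Prop := out = temukan_indeks_maksimal_alt angka
instance (angka : List Int) (out : List Int) : Decidable (Spec_temukan_indeks_maksimal angka out) := by unfold Spec_temukan_indeks_maksimal; infer_instance

-- ===== CLAIM (what is proved, stated in full; the proofs are below) =====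
def Claim_equal_temukan_indeks_maksimal : Prop := ∀ (angka : List Int), Dom_temukan_indeks_maksimal angka → Spec_temukan_indeks_maksimal angka (temukan_indeks_maksimal angka)

-- ===== LEMMAS AND PROOFS =====


-- helper: the value angka[i]-1 used by both programs
def pvG (l : List Int) (i : Int) : Int := PySem.List.pyGetD l i 0 - 1

-- the product A compares
def pvF (l : List Int) (q : Int × Int) : Int := pvG l q.1 * pvG l q.2

-- all index pairs (i, j), 0 <= i < j < len, in A's (lexicographic) order
def pvPairs (l : List Int) : List (Int × Int) :=
  (PySem.List.pyRange 0 (l.length : Int) 1).flatMap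
    (fun i => (PySem.List.pyRange (i + 1) (l.length : Int) 1).map (fun j => (i, j)))

def pvLex (q q' : Int × Int) : Prop := q.1 < q'.1 ∨ (q.1 = q'.1 ∧ q.2 < q'.2)

-- B's loop body, named (definitionally equal to the lambda in the port of B)
def pvStepB (l : List Int) (st : Int × Int × Int × Int × Option Int × List Int) (k : Int) :
    Int × Int × Int × Int × Option Int × List Int :=
  let h := PySem.List.pyGetD l k 0 - 1
  let cj : Int × Int :=
    if h > 0 then (h * st.1, st.2.1)
    else if h < 0 then (h * st.2.2.1, st.2.2.2.1)
    else (0, k + 1)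
  let bp : Int × List Int :=
    match st.2.2.2.2.1 with
    | none => (cj.1, [k, cj.2])
    | some b => if cj.1 ≥ b then (cj.1, [k, cj.2]) else (b, st.2.2.2.2.2)
  let mx : Int × Int := if h ≥ st.1 then (h, k) else (st.1, st.2.1)
  let mn : Int × Int := if h ≤ st.2.2.1 then (h, k) else (st.2.2.1, st.2.2.2.1)
  (mx.1, mx.2, mn.1, mn.2, some bp.1, bp.2)

-- loop invariants for B
def pvMaxInv (l : List Int) (m mx mxi : Int) : Prop :=
  m ≤ mxi ∧ mxi < (l.length : Int) ∧ pvG l mxi = mx ∧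
  (∀ j, m ≤ j → j < (l.length : Int) → pvG l j ≤ mx) ∧
  (∀ j, m ≤ j → j < mxi → pvG l j < mx)

def pvMinInv (l : List Int) (m mn mni : Int) : Prop :=
  m ≤ mni ∧ mni < (l.length : Int) ∧ pvG l mni = mn ∧
  (∀ j, m ≤ j → j < (l.length : Int) → mn ≤ pvG l j) ∧
  (∀ j, m ≤ j → j < mni → mn < pvG l j)

def pvBestInv (l : List Int) (m bv : Int) (pair : List Int) : Prop :=
  (∀ i j, m ≤ i → i < j → j < (l.length : Int) → pvG l i * pvG l j ≤ bv) ∧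
  ∃ pi pj, pair = [pi, pj] ∧ m ≤ pi ∧ pi < pj ∧ pj < (l.length : Int) ∧
    pvG l pi * pvG l pj = bv ∧
    (∀ i j, m ≤ i → i < j → j < (l.length : Int) → pvG l i * pvG l j = bv →
      pi < i ∨ (pi = i ∧ pj ≤ j))

def pvInv (l : List Int) (m : Int) (st : Int × Int × Int × Int × Option Int × List Int) : Prop :=
  pvMaxInv l m st.1 st.2.1 ∧ pvMinInv l m st.2.2.1 st.2.2.2.1 ∧
  (if m ≤ (l.length : Int) - 2 then
    ∃ bv, st.2.2.2.2.1 = some bv ∧ pvBestInv l m bv st.2.2.2.2.2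
   else st.2.2.2.2.1 = none)

-- generic: a strict-improvement fold returns the running max and the FIRST element attaining it
theorem pv_argmax_fold {α β : Type} (f : α → Int) (out : α → β) :
    ∀ (L : List α) (b : Int) (p : β),
      L.foldl (fun st q => if f q > st.1 then (f q, out q) else st) (b, p)
        = ((L.map f).foldl max b,
           if (L.map f).foldl max b > b
           then ((L.find? (fun q => decide ((L.map f).foldl max b ≤ f q))).elim p out)
           else p) := by
  intro L
  induction L with
  | nil => intro b p; simp
  | cons q T ih =>
    intro b p
    have hmono := (PySem.List.le_foldl_max (T.map f) (f q)).1
    have hmem := PySem.List.foldl_max_mem (T.map f) (f q)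
    simp only [List.foldl_cons, List.map_cons, List.find?_cons]
    by_cases hq : f q > b
    · rw [if_pos hq, ih (f q) (out q)]
      have hb : max b (f q) = f q := by omega
      simp only [hb]
      by_cases hm : (T.map f).foldl max (f q) > f q
      · rw [if_pos hm, if_pos (by omega : (T.map f).foldl max (f q) > b)]
        have hpredq : (decide ((T.map f).foldl max (f q) ≤ f q)) = false := by
          simp; omega
        simp only [hpredq]
        rcases hmem with h | h
        · omega
        · rcases List.mem_map.mp h with ⟨x, hx, hfx⟩
          have hsome : (T.find? (fun y => decide ((T.map f).foldl max (f q) ≤ f y))).isSome := by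
            rw [List.find?_isSome]
            exact ⟨x, hx, by simp [hfx]⟩
          cases hfind : T.find? (fun y => decide ((T.map f).foldl max (f q) ≤ f y)) with
          | none => rw [hfind] at hsome; simp at hsome
          | some r => simp
      · rw [if_neg hm]
        have hm' : (T.map f).foldl max (f q) = f q := by omega
        simp only [hm']
        rw [if_pos hq]
        simp
    · rw [if_neg hq, ih b p]
      have hb : max b (f q) = b := by omega
      simp only [hb]
      by_cases hm : (T.map f).foldl max b > b
      · rw [if_pos hm, if_pos hm]
        have : (decide ((T.map f).foldl max b ≤ f q)) = false := by simp; omega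
        simp only [this]
      · rw [if_neg hm, if_neg hm]

theorem pv_mem_pairs (l : List Int) (q : Int × Int) :
    q ∈ pvPairs l ↔ 0 ≤ q.1 ∧ q.1 < q.2 ∧ q.2 < (l.length : Int) := by
  unfold pvPairs
  simp only [List.mem_flatMap, List.mem_map, PySem.List.mem_pyRange_one]
  constructor
  · rintro ⟨i, ⟨h1, h2⟩, j, ⟨h3, h4⟩, rfl⟩
    refine ⟨h1, by omega, h4⟩
  · rintro ⟨h1, h2, h3⟩
    exact ⟨q.1, ⟨h1, by omega⟩, q.2, ⟨by omega, h3⟩, rfl⟩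

theorem pv_pairwise_pairs (l : List Int) : (pvPairs l).Pairwise pvLex := by
  unfold pvPairs
  rw [List.pairwise_flatMap]
  constructor
  · intro a _
    rw [List.pairwise_map]
    exact (PySem.List.pairwise_lt_pyRange_one _ _).imp (fun h => Or.inr ⟨rfl, h⟩)
  · refine (PySem.List.pairwise_lt_pyRange_one _ _).imp ?_
    rintro a₁ a₂ hlt x hx y hy
    rcases List.mem_map.mp hx with ⟨j1, _, rfl⟩
    rcases List.mem_map.mp hy with ⟨j2, _, rfl⟩
    exact Or.inl hlt

-- A's nested loop, flattened and characterized
theorem pvA_fold (l : List Int) :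
    temukan_indeks_maksimal l =
      ((pvPairs l).foldl (fun st q => if pvF l q > st.1 then (pvF l q, [q.1, q.2]) else st)
        ((0 : Int), ([0, 0] : List Int))).2 := by
  unfold temukan_indeks_maksimal pvPairs
  rw [List.foldl_flatMap]
  simp only [List.foldl_map]
  rfl

theorem pvA_eq (l : List Int) :
    temukan_indeks_maksimal l =
      (if ((pvPairs l).map (pvF l)).foldl max 0 > 0
       then ((pvPairs l).find?
              (fun q => decide (((pvPairs l).map (pvF l)).foldl max 0 ≤ pvF l q))).elim
              [0, 0] (fun q => [q.1, q.2])
       else [0, 0]) := by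
  rw [pvA_fold, pv_argmax_fold (pvF l) (fun q => [q.1, q.2])]

-- one step of B's loop preserves the invariant
theorem pvBest_step (l : List Int) (k c jj : Int) (best : Option Int) (pair : List Int)
    (h0 : 0 ≤ k) (h2 : k ≤ (l.length : Int) - 2)
    (hrow_ub : ∀ j, k < j → j < (l.length : Int) → pvG l k * pvG l j ≤ c)
    (hjj1 : k < jj) (hjj2 : jj < (l.length : Int)) (hjjv : pvG l k * pvG l jj = c)
    (hrow_lt : ∀ j, k < j → j < jj → pvG l k * pvG l j < c)
    (hbest : if k + 1 ≤ (l.length : Int) - 2 then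
        ∃ bv, best = some bv ∧ pvBestInv l (k + 1) bv pair
      else best = none) :
    pvBestInv l k
      ((match best with
        | none => ((c, [k, jj]) : Int × List Int)
        | some b => if c ≥ b then (c, [k, jj]) else (b, pair)).1)
      ((match best with
        | none => ((c, [k, jj]) : Int × List Int)
        | some b => if c ≥ b then (c, [k, jj]) else (b, pair)).2) := by
  cases best with
  | none =>
    have hk : ¬ (k + 1 ≤ (l.length : Int) - 2) := by
      intro hle
      rw [if_pos hle] at hbest
      rcases hbest with ⟨bv, hbv, _⟩
      exact absurd hbv (by simp)
    have hkn : k = (l.length : Int) - 2 := by omega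
    unfold pvBestInv
    simp only
    constructor
    · intro i j hi hij hj
      have : i = k := by omega
      subst this
      exact hrow_ub j hij hj
    · refine ⟨k, jj, rfl, le_refl _, hjj1, hjj2, hjjv, ?_⟩
      intro i j hi hij hj hv
      right
      have : i = k := by omega
      refine ⟨this.symm, ?_⟩
      by_contra hlt
      subst this
      exact absurd hv (by have := hrow_lt j hij (by omega); omega)
  | some bv =>
    have hk : k + 1 ≤ (l.length : Int) - 2 := by
      by_contra hle
      rw [if_neg hle] at hbest
      exact absurd hbest (by simp)
    rw [if_pos hk] at hbest
    rcases hbest with ⟨bv', hbv', hBI⟩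
    have hbb : bv = bv' := by injection hbv'
    subst hbb
    unfold pvBestInv at hBI
    obtain ⟨hub, pi, pj, hpair, hpi, hpij, hpj, hpv, hlexmin⟩ := hBI
    unfold pvBestInv
    simp only
    by_cases hc : c ≥ bv
    · rw [if_pos hc]
      constructor
      · intro i j hi hij hj
        rcases eq_or_lt_of_le hi with rfl | hgt
        · exact hrow_ub j hij hj
        · exact le_trans (hub i j (by omega) hij hj) hc
      · refine ⟨k, jj, rfl, le_refl _, hjj1, hjj2, hjjv, ?_⟩
        intro i j hi hij hj hv
        rcases eq_or_lt_of_le hi with rfl | hgt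
        · right
          refine ⟨rfl, ?_⟩
          by_contra hlt
          exact absurd hv (by have := hrow_lt j hij (by omega); omega)
        · exact Or.inl hgt
    · rw [if_neg hc]
      constructor
      · intro i j hi hij hj
        rcases eq_or_lt_of_le hi with rfl | hgt
        · exact le_trans (hrow_ub j hij hj) (by omega)
        · exact hub i j (by omega) hij hj
      · refine ⟨pi, pj, hpair, by omega, hpij, hpj, hpv, ?_⟩
        intro i j hi hij hj hv
        rcases eq_or_lt_of_le hi with rfl | hgt
        · exact absurd hv (by have := hrow_ub j hij hj; omega)
        · exact hlexmin i j (by omega) hij hj hv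

theorem pvStep_inv (l : List Int) (k : Int) (st : Int × Int × Int × Int × Option Int × List Int)
    (h0 : 0 ≤ k) (h2 : k ≤ (l.length : Int) - 2) (hInv : pvInv l (k + 1) st) :
    pvInv l k (pvStepB l st k) := by
  obtain ⟨mx, mxi, mn, mni, best, pair⟩ := st
  obtain ⟨hMax, hMin, hBest⟩ := hInv
  dsimp only at hMax hMin hBest
  unfold pvMaxInv at hMax
  unfold pvMinInv at hMin
  obtain ⟨hxm, hxn, hxv, hxb, hxs⟩ := hMax
  obtain ⟨hnm, hnn, hnv, hnb, hns⟩ := hMin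
  have hstep : pvStepB l (mx, mxi, mn, mni, best, pair) k =
      ((if pvG l k ≥ mx then (pvG l k, k) else (mx, mxi)).1,
       (if pvG l k ≥ mx then (pvG l k, k) else (mx, mxi)).2,
       (if pvG l k ≤ mn then (pvG l k, k) else (mn, mni)).1,
       (if pvG l k ≤ mn then (pvG l k, k) else (mn, mni)).2,
       some (match best with
             | none =>
               (((if pvG l k > 0 then (pvG l k * mx, mxi)
                  else if pvG l k < 0 then (pvG l k * mn, mni)
                  else (0, k + 1)).1,
                 [k, (if pvG l k > 0 then (pvG l k * mx, mxi)
                      else if pvG l k < 0 then (pvG l k * mn, mni)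
                      else (0, k + 1)).2]) : Int × List Int)
             | some b =>
               if (if pvG l k > 0 then (pvG l k * mx, mxi)
                   else if pvG l k < 0 then (pvG l k * mn, mni)
                   else (0, k + 1)).1 ≥ b then
                 ((if pvG l k > 0 then (pvG l k * mx, mxi)
                   else if pvG l k < 0 then (pvG l k * mn, mni)
                   else (0, k + 1)).1,
                  [k, (if pvG l k > 0 then (pvG l k * mx, mxi)
                       else if pvG l k < 0 then (pvG l k * mn, mni)
                       else (0, k + 1)).2])
               else (b, pair)).1,
       (match best with
             | none =>
               (((if pvG l k > 0 then (pvG l k * mx, mxi)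
                  else if pvG l k < 0 then (pvG l k * mn, mni)
                  else (0, k + 1)).1,
                 [k, (if pvG l k > 0 then (pvG l k * mx, mxi)
                      else if pvG l k < 0 then (pvG l k * mn, mni)
                      else (0, k + 1)).2]) : Int × List Int)
             | some b =>
               if (if pvG l k > 0 then (pvG l k * mx, mxi)
                   else if pvG l k < 0 then (pvG l k * mn, mni)
                   else (0, k + 1)).1 ≥ b then
                 ((if pvG l k > 0 then (pvG l k * mx, mxi)
                   else if pvG l k < 0 then (pvG l k * mn, mni)
                   else (0, k + 1)).1,
                  [k, (if pvG l k > 0 then (pvG l k * mx, mxi)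
                       else if pvG l k < 0 then (pvG l k * mn, mni)
                       else (0, k + 1)).2])
               else (b, pair)).2) := rfl
  rw [hstep]
  have hMX : pvMaxInv l k (if pvG l k ≥ mx then (pvG l k, k) else (mx, mxi)).1
      (if pvG l k ≥ mx then (pvG l k, k) else (mx, mxi)).2 := by
    unfold pvMaxInv
    by_cases hx : pvG l k ≥ mx
    · rw [if_pos hx]
      refine ⟨le_refl _, by omega, rfl, ?_, ?_⟩
      · intro j hj1 hj2
        rcases eq_or_lt_of_le hj1 with rfl | hgt
        · exact le_refl _
        · exact le_trans (hxb j (by omega) hj2) hx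
      · intro j hj1 hj2
        simp only at hj2
        omega
    · rw [if_neg hx]
      refine ⟨by omega, hxn, hxv, ?_, ?_⟩
      · intro j hj1 hj2
        rcases eq_or_lt_of_le hj1 with rfl | hgt
        · omega
        · exact hxb j (by omega) hj2
      · intro j hj1 hj2
        rcases eq_or_lt_of_le hj1 with rfl | hgt
        · omega
        · exact hxs j (by omega) hj2
  have hMN : pvMinInv l k (if pvG l k ≤ mn then (pvG l k, k) else (mn, mni)).1
      (if pvG l k ≤ mn then (pvG l k, k) else (mn, mni)).2 := by
    unfold pvMinInv
    by_cases hx : pvG l k ≤ mn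
    · rw [if_pos hx]
      refine ⟨le_refl _, by omega, rfl, ?_, ?_⟩
      · intro j hj1 hj2
        rcases eq_or_lt_of_le hj1 with rfl | hgt
        · exact le_refl _
        · exact le_trans hx (hnb j (by omega) hj2)
      · intro j hj1 hj2
        simp only at hj2
        omega
    · rw [if_neg hx]
      refine ⟨by omega, hnn, hnv, ?_, ?_⟩
      · intro j hj1 hj2
        rcases eq_or_lt_of_le hj1 with rfl | hgt
        · omega
        · exact hnb j (by omega) hj2
      · intro j hj1 hj2
        rcases eq_or_lt_of_le hj1 with rfl | hgt
        · omega
        · exact hns j (by omega) hj2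
  refine ⟨hMX, hMN, ?_⟩
  rw [if_pos h2]
  refine ⟨_, rfl, ?_⟩
  rcases lt_trichotomy (pvG l k) 0 with hsig | hsig | hsig
  · have hcj : (if pvG l k > 0 then (pvG l k * mx, mxi)
        else if pvG l k < 0 then (pvG l k * mn, mni)
        else (0, k + 1)) = (pvG l k * mn, mni) := by
      rw [if_neg (by omega), if_pos hsig]
    rw [hcj]
    exact pvBest_step l k (pvG l k * mn) mni best pair h0 h2
      (fun j hj1 hj2 => mul_le_mul_of_nonpos_left (hnb j (by omega) hj2) (le_of_lt hsig))
      (by omega) hnn (by rw [hnv])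
      (fun j hj1 hj2 => mul_lt_mul_of_neg_left (hns j (by omega) hj2) hsig)
      hBest
  · have hcj : (if pvG l k > 0 then (pvG l k * mx, mxi)
        else if pvG l k < 0 then (pvG l k * mn, mni)
        else (0, k + 1)) = (0, k + 1) := by
      rw [if_neg (by omega), if_neg (by omega)]
    rw [hcj]
    exact pvBest_step l k 0 (k + 1) best pair h0 h2
      (fun j hj1 hj2 => by rw [hsig, zero_mul])
      (by omega) (by omega) (by rw [hsig, zero_mul])
      (fun j hj1 hj2 => by omega)
      hBest
  · have hcj : (if pvG l k > 0 then (pvG l k * mx, mxi)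
        else if pvG l k < 0 then (pvG l k * mn, mni)
        else (0, k + 1)) = (pvG l k * mx, mxi) := by
      rw [if_pos hsig]
    rw [hcj]
    exact pvBest_step l k (pvG l k * mx) mxi best pair h0 h2
      (fun j hj1 hj2 => mul_le_mul_of_nonneg_left (hxb j (by omega) hj2) (le_of_lt hsig))
      (by omega) hxn (by rw [hxv])
      (fun j hj1 hj2 => mul_lt_mul_of_pos_left (hxs j (by omega) hj2) hsig)
      hBest

theorem pvLoop_inv (l : List Int) :
    ∀ (t : Nat) (st : Int × Int × Int × Int × Option Int × List Int),
      (t : Int) ≤ (l.length : Int) - 2 → pvInv l ((t : Int) + 1) st →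
      pvInv l 0 ((PySem.List.pyRange (t : Int) (-1) (-1)).foldl (pvStepB l) st) := by
  intro t
  induction t with
  | zero =>
    intro st ht hInv
    rw [show ((0 : Nat) : Int) = 0 from rfl] at *
    rw [PySem.List.pyRange_neg_one_cons (by omega : (-1 : Int) < 0),
        PySem.List.pyRange_neg_one_eq_nil (by omega : (0 : Int) - 1 ≤ -1)]
    simp only [List.foldl_cons, List.foldl_nil]
    exact pvStep_inv l 0 st (le_refl 0) ht hInv
  | succ t ih =>
    intro st ht hInv
    push_cast at ht hInv ⊢
    rw [PySem.List.pyRange_neg_one_cons (by omega : (-1 : Int) < (t : Int) + 1)]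
    simp only [List.foldl_cons]
    rw [show ((t : Int) + 1 - 1) = (t : Int) by ring]
    exact ih _ (by omega) (pvStep_inv l ((t : Int) + 1) st (by omega) (by omega) hInv)

theorem pvAlt_fold (l : List Int) :
    temukan_indeks_maksimal_alt l =
      (if (l.length : Int) < 2 then [0, 0] else
        match ((PySem.List.pyRange ((l.length : Int) - 2) (-1) (-1)).foldl (pvStepB l)
            (PySem.List.pyGetD l ((l.length : Int) - 1) 0 - 1, (l.length : Int) - 1,
             PySem.List.pyGetD l ((l.length : Int) - 1) 0 - 1, (l.length : Int) - 1,
             none, [0, 0])).2.2.2.2.1 with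
        | some b =>
          if b > 0 then
            ((PySem.List.pyRange ((l.length : Int) - 2) (-1) (-1)).foldl (pvStepB l)
              (PySem.List.pyGetD l ((l.length : Int) - 1) 0 - 1, (l.length : Int) - 1,
               PySem.List.pyGetD l ((l.length : Int) - 1) 0 - 1, (l.length : Int) - 1,
               none, [0, 0])).2.2.2.2.2
          else [0, 0]
        | none => [0, 0]) := rfl

theorem pv_main (l : List Int) : temukan_indeks_maksimal l = temukan_indeks_maksimal_alt l := by
  by_cases hn : (l.length : Int) < 2
  · rw [pvAlt_fold, if_pos hn, pvA_eq]
    have hpairs : pvPairs l = [] :=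
      List.eq_nil_iff_forall_not_mem.mpr (fun q hq => by rw [pv_mem_pairs] at hq; omega)
    rw [hpairs]
    simp
  · rw [not_lt] at hn
    rw [pvAlt_fold, if_neg (show ¬ ((l.length : Int) < 2) by omega)]
    -- run the loop invariant on B's fold
    have hInv0 : pvInv l (((((l.length : Int) - 2).toNat : Int)) + 1)
        (PySem.List.pyGetD l ((l.length : Int) - 1) 0 - 1, (l.length : Int) - 1,
         PySem.List.pyGetD l ((l.length : Int) - 1) 0 - 1, (l.length : Int) - 1,
         none, [0, 0]) := by
      rw [Int.toNat_of_nonneg (by omega : (0 : Int) ≤ (l.length : Int) - 2)]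
      unfold pvInv pvMaxInv pvMinInv
      dsimp only
      refine ⟨⟨by omega, by omega, rfl, ?_, ?_⟩, ⟨by omega, by omega, rfl, ?_, ?_⟩, ?_⟩
      · intro j hj1 hj2
        have hje : j = (l.length : Int) - 1 := by omega
        rw [hje]
        exact le_rfl
      · intro j hj1 hj2; omega
      · intro j hj1 hj2
        have hje : j = (l.length : Int) - 1 := by omega
        rw [hje]
        exact le_rfl
      · intro j hj1 hj2; omega
      · have hcond : ¬ ((l.length : Int) - 2 + 1 ≤ (l.length : Int) - 2) := by omega
        rw [if_neg hcond]
    have hFin := pvLoop_inv l (((l.length : Int) - 2).toNat) _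
      (by omega) hInv0
    rw [Int.toNat_of_nonneg (by omega : (0 : Int) ≤ (l.length : Int) - 2)] at hFin
    obtain ⟨-, -, hBest⟩ := hFin
    rw [if_pos (by omega : (0 : Int) ≤ (l.length : Int) - 2)] at hBest
    obtain ⟨bv, hbv, hBI⟩ := hBest
    unfold pvBestInv at hBI
    obtain ⟨hub, pi, pj, hpair, hpi, hpij, hpj, hpv, hlex⟩ := hBI
    rw [pvA_eq, hbv, hpair]
    dsimp only
    -- relate bv with A's running max m
    have hmemP : (pi, pj) ∈ pvPairs l := (pv_mem_pairs l (pi, pj)).mpr ⟨hpi, hpij, hpj⟩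
    have hub' : ∀ x ∈ (pvPairs l).map (pvF l), x ≤ bv := by
      rintro x hx
      rcases List.mem_map.mp hx with ⟨q, hq, rfl⟩
      rw [pv_mem_pairs] at hq
      exact hub q.1 q.2 hq.1 hq.2.1 hq.2.2
    have hbvm : bv ≤ ((pvPairs l).map (pvF l)).foldl max 0 := by
      have := (PySem.List.le_foldl_max ((pvPairs l).map (pvF l)) 0).2 (pvF l (pi, pj))
        (List.mem_map_of_mem hmemP)
      have hfv : pvF l (pi, pj) = bv := hpv
      omega
    have h0m : (0 : Int) ≤ ((pvPairs l).map (pvF l)).foldl max 0 :=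
      (PySem.List.le_foldl_max ((pvPairs l).map (pvF l)) 0).1
    have hm : ((pvPairs l).map (pvF l)).foldl max 0 = max 0 bv := by
      rcases PySem.List.foldl_max_mem ((pvPairs l).map (pvF l)) 0 with h | h
      · omega
      · have := hub' _ h
        omega
    by_cases hbv0 : bv > 0
    · rw [if_pos hbv0, if_pos (by omega : ((pvPairs l).map (pvF l)).foldl max 0 > 0)]
      have hmval : ((pvPairs l).map (pvF l)).foldl max 0 = bv := by omega
      have hpred : decide (((pvPairs l).map (pvF l)).foldl max 0 ≤ pvF l (pi, pj)) = true := by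
        have hfv : pvF l (pi, pj) = bv := hpv
        simp only [decide_eq_true_eq]
        omega
      have hsome : ((pvPairs l).find?
          (fun q => decide (((pvPairs l).map (pvF l)).foldl max 0 ≤ pvF l q))).isSome :=
        List.find?_isSome.mpr ⟨(pi, pj), hmemP, hpred⟩
      obtain ⟨q, hq⟩ := Option.isSome_iff_exists.mp hsome
      have hqm : q ∈ pvPairs l := List.mem_of_find?_eq_some hq
      have hqb := (pv_mem_pairs l q).mp hqm
      have hqv : pvF l q = bv := by
        have h1 : ((pvPairs l).map (pvF l)).foldl max 0 ≤ pvF l q := by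
          have := List.find?_some hq
          simpa using this
        have h2 : pvF l q ≤ bv := hub q.1 q.2 hqb.1 hqb.2.1 hqb.2.2
        omega
      have hlexq : pi < q.1 ∨ (pi = q.1 ∧ pj ≤ q.2) :=
        hlex q.1 q.2 hqb.1 hqb.2.1 hqb.2.2 hqv
      have hqe : q = (pi, pj) := by
        rcases List.find?_eq_some_iff_append.mp hq with ⟨hpq, as, bs, heq, hnot⟩
        have hmem2 : (pi, pj) ∈ as ++ q :: bs := heq ▸ hmemP
        rcases List.mem_append.mp hmem2 with hin | hin
        · have := hnot _ hin
          rw [hpred] at this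
          simp at this
        · rcases List.mem_cons.mp hin with he | hin
          · exact he.symm
          · exfalso
            have hpw := pv_pairwise_pairs l
            rw [heq] at hpw
            have h1 := (List.pairwise_append.mp hpw).2.1
            have h2 := (List.pairwise_cons.mp h1).1 _ hin
            unfold pvLex at h2
            rcases h2 with h2 | h2 <;> omega
      rw [hq]
      simp only [Option.elim, hqe]
    · rw [if_neg hbv0, if_neg (by omega : ¬ ((pvPairs l).map (pvF l)).foldl max 0 > 0)]

-- ===== VERDICT (by name: the statement is the Claim_ definition above) =====
theorem temukan_indeks_maksimal_spec : Claim_equal_temukan_indeks_maksimal := by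
  intro angka _
  exact pv_main angka
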